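-- pv_equiv track=rewrite | github.com/CLozano03/myAoC | aoc2024/dia09/dia09_2.py | pos_info
-- ===== SOURCE A (Python) =====
-- from typing import List
--
-- def pos_info(disk: List[int], files_or_free: bool) -> List[int]:
--     pos = []
--     pos_accum = 0
--
--     for i in range(0, len(disk)):
--         if disk[i] == 0:
--             continue
--
--         if files_or_free:
--             if i % 2 == 0:
--                 pos.append(pos_accum)
--         else:
--             if i % 2 == 1:
--                 pos.append(pos_accum)
--
--         pos_accum += disk[i]
--
--     return pos
-- ===== SOURCE B (Python) =====
-- from typing import List
--
-- def pos_info(disk: List[int], files_or_free: bool) -> List[int]: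
--     # Reverse pass with suffix sums: position of element i == total - sum(disk[i:]),
--     # so walk the list back-to-front and build the result in reverse.
--     total = sum(disk)
--     pos = []
--     suffix = 0
--     for i in range(len(disk) - 1, -1, -1):
--         suffix += disk[i]
--         if disk[i] != 0 and (i % 2 == 0) == files_or_free:
--             pos.append(total - suffix)
--     pos.reverse()
--     return pos
-- ===== Notes on version B (the rewrite author's own statement) =====
-- stated objective: alternative
-- what changed: Instead of a forward pass with a running prefix accumulator, B computes the total once, then walks the list BACKWARDS maintaining a suffix sum, emitting total - suffix as each position and building the result back-to-front (reversed at the end).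
import Mathlib
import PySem

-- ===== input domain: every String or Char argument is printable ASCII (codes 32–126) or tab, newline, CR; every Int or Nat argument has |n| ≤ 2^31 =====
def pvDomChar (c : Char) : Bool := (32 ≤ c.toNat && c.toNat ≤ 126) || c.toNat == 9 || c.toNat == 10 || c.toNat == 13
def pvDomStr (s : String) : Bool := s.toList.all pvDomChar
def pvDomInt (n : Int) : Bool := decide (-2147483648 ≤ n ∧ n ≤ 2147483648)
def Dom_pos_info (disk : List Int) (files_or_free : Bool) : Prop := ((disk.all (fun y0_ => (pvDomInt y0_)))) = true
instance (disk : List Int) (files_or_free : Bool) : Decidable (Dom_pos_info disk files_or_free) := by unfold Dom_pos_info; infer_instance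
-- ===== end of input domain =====

-- B replaces A's forward pass with a running prefix accumulator by a BACKWARD pass:
-- it sums the list once, walks it in reverse maintaining a suffix sum, emits
-- total - suffix as each position, and builds the result back-to-front.

-- ===== PORT A =====
-- A's loop 'for i in range(len(disk))' reading disk[i]: ported as a fold over enumerate(disk),
-- carrying the state (pos, pos_accum) exactly as the Python does.
def pos_info (disk : List Int) (files_or_free : Bool) : List Int :=
  ((PySem.List.enumerate disk 0).foldl
    (fun (st : List Int × Int) p =>
      if p.2 = 0 then st
      else
        let pos :=
          if files_or_free then
            (if PySem.Int.mod p.1 2 = 0 then st.1 ++ [st.2] else st.1)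
          else
            (if PySem.Int.mod p.1 2 = 1 then st.1 ++ [st.2] else st.1)
        (pos, st.2 + p.2))
    ([], 0)).1

-- ===== PORT B =====
-- total = sum(disk); loop 'for i in range(len(disk)-1, -1, -1)' reading disk[i]:
-- ported as a fold over the REVERSED enumeration carrying (pos, suffix); final pos.reverse().
def pos_info_alt (disk : List Int) (files_or_free : Bool) : List Int :=
  let total := disk.sum
  (((PySem.List.enumerate disk 0).reverse).foldl
    (fun (st : List Int × Int) p =>
      let suffix := st.2 + p.2
      let pos :=
        if p.2 ≠ 0 ∧ ((PySem.Int.mod p.1 2 = 0) = (files_or_free = true)) then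
          st.1 ++ [total - suffix]
        else st.1
      (pos, suffix))
    ([], 0)).1.reverse

-- ===== PRECONDITION & SPEC =====
def Spec_pos_info (disk : List Int) (files_or_free : Bool) (out : List Int) : Prop := out = pos_info_alt disk files_or_free
instance (disk : List Int) (files_or_free : Bool) (out : List Int) : Decidable (Spec_pos_info disk files_or_free out) := by unfold Spec_pos_info; infer_instance

-- ===== CLAIM (what is proved, stated in full; the proofs are below) =====
def Claim_equal_pos_info : Prop := ∀ (disk : List Int) (files_or_free : Bool), Dom_pos_info disk files_or_free → Spec_pos_info disk files_or_free (pos_info disk files_or_free)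

-- ===== LEMMAS AND PROOFS =====

-- A's loop body as a named function (definitionally the one inside pos_info)
def pvStepA (fof : Bool) (st : List Int × Int) (p : Int × Int) : List Int × Int :=
  if p.2 = 0 then st
  else
    let pos :=
      if fof then
        (if PySem.Int.mod p.1 2 = 0 then st.1 ++ [st.2] else st.1)
      else
        (if PySem.Int.mod p.1 2 = 1 then st.1 ++ [st.2] else st.1)
    (pos, st.2 + p.2)

-- B's loop body as a named function (definitionally the one inside pos_info_alt)
def pvStepB (fof : Bool) (total : Int) (st : List Int × Int) (p : Int × Int) : List Int × Int :=
  let suffix := st.2 + p.2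
  let pos :=
    if p.2 ≠ 0 ∧ ((PySem.Int.mod p.1 2 = 0) = (fof = true)) then
      st.1 ++ [total - suffix]
    else st.1
  (pos, suffix)

-- structural spec both ports are reduced to: suffix ds starting at index k with running sum acc
def pvSpec (fof : Bool) : List Int → Nat → Int → List Int
  | [], _, _ => []
  | d :: ds, k, acc =>
      (if d ≠ 0 ∧ ((PySem.Int.mod (k : Int) 2 = 0) = (fof = true)) then [acc] else [])
        ++ pvSpec fof ds (k + 1) (acc + d)

theorem pvA_eq (fof : Bool) : ∀ (ds : List Int) (k : Nat) (acc : Int) (pos : List Int),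
    ((PySem.List.enumerate ds (k : Int)).foldl (pvStepA fof) (pos, acc)).1
      = pos ++ pvSpec fof ds k acc := by
  intro ds
  induction ds with
  | nil => intro k acc pos; simp [PySem.List.enumerate_nil, pvSpec]
  | cons d ds ih =>
    intro k acc pos
    have hk : (k : Int) + 1 = ((k + 1 : Nat) : Int) := by push_cast; ring
    have hmod : PySem.Int.mod (k : Int) 2 = ((k % 2 : Nat) : Int) := PySem.Int.mod_natCast k 2
    rw [PySem.List.enumerate_cons, List.foldl_cons, hk, pvSpec]
    by_cases hd : d = 0
    · have hstep : pvStepA fof (pos, acc) ((k : Int), d) = (pos, acc) := by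
        simp [pvStepA, hd]
      rw [hstep, ih]
      simp [hd]
    · rcases Nat.mod_two_eq_zero_or_one k with h | h <;> cases fof
      · have hstep : pvStepA false (pos, acc) ((k : Int), d) = (pos, acc + d) := by
          simp only [pvStepA, hmod, h, Nat.cast_zero]
          norm_num [hd]
        rw [hstep, ih]
        simp only [hmod, h, Nat.cast_zero]
        norm_num
      · have hstep : pvStepA true (pos, acc) ((k : Int), d) = (pos ++ [acc], acc + d) := by
          simp only [pvStepA, hmod, h, Nat.cast_zero]
          norm_num [hd]
        rw [hstep, ih]
        simp only [hmod, h, Nat.cast_zero]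
        norm_num [hd, List.append_assoc]
      · have hstep : pvStepA false (pos, acc) ((k : Int), d) = (pos ++ [acc], acc + d) := by
          simp only [pvStepA, hmod, h, Nat.cast_one]
          norm_num [hd]
        rw [hstep, ih]
        simp only [hmod, h, Nat.cast_one]
        norm_num [hd, List.append_assoc]
      · have hstep : pvStepA true (pos, acc) ((k : Int), d) = (pos, acc + d) := by
          simp only [pvStepA, hmod, h, Nat.cast_one]
          norm_num [hd]
        rw [hstep, ih]
        simp only [hmod, h, Nat.cast_one]
        norm_num

-- B's fold over the reversed enumeration (with acc = total - suffix sum) computes the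
-- reversed spec positions and the suffix sum.
theorem pvB_eq (fof : Bool) (total : Int) : ∀ (ds : List Int) (k : Nat),
    ((PySem.List.enumerate ds (k : Int)).reverse).foldl (pvStepB fof total) ([], 0)
      = ((pvSpec fof ds k (total - ds.sum)).reverse, ds.sum) := by
  intro ds
  induction ds with
  | nil => intro k; simp [PySem.List.enumerate_nil, pvSpec]
  | cons d ds ih =>
    intro k
    simp only [List.foldl_reverse] at *
    have hk : (k : Int) + 1 = ((k + 1 : Nat) : Int) := by push_cast; ring
    rw [PySem.List.enumerate_cons, List.foldr_cons, hk, ih (k + 1), pvSpec]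
    show pvStepB fof total ((pvSpec fof ds (k + 1) (total - ds.sum)).reverse, ds.sum) ((k : Int), d) = _
    unfold pvStepB
    dsimp only
    by_cases hcond : d ≠ 0 ∧ ((PySem.Int.mod (k : Int) 2 = 0) = (fof = true))
    · rw [if_pos hcond, if_pos hcond, List.reverse_append]
      simp only [List.reverse_cons, List.reverse_nil, List.nil_append, Prod.mk.injEq, List.sum_cons]
      refine ⟨?_, by ring⟩
      have e1 : total - (d + ds.sum) + d = total - ds.sum := by ring
      have e2 : total - (ds.sum + d) = total - (d + ds.sum) := by ring
      rw [e1, e2]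
    · rw [if_neg hcond, if_neg hcond, List.nil_append]
      simp only [Prod.mk.injEq, List.sum_cons]
      have e1 : total - (d + ds.sum) + d = total - ds.sum := by ring
      rw [e1]
      exact ⟨rfl, by ring⟩

-- ===== VERDICT (by name: the statement is the Claim_ definition above) =====
theorem pos_info_spec : Claim_equal_pos_info := by
  intro disk fof _
  unfold Spec_pos_info
  show (List.foldl (pvStepA fof) ([], 0) (PySem.List.enumerate disk 0)).1
      = (((PySem.List.enumerate disk 0).reverse).foldl (pvStepB fof disk.sum) ([], 0)).1.reverse
  have hA := pvA_eq fof disk 0 0 []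
  simp only [Nat.cast_zero, List.nil_append] at hA
  have hB := pvB_eq fof disk.sum disk 0
  simp only [Nat.cast_zero, sub_self] at hB
  rw [hB]
  simp only [List.reverse_reverse]
  exact hA
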